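-- pv_equiv track=rewrite | github.com/MrBrantCode/unitest_baseline | mut_generate/mist_train_cf/cf_57745/solution.py | makeLargestSpecial
-- ===== SOURCE A (Python) =====
-- def makeLargestSpecial(S):
--     def recursion(S):
--         count = i = 0
--         partition = []
--         for j in range(len(S)):
--             if S[j] == '1':
--                 count += 1
--             else:
--                 count -= 1
--             if count == 0:
--                 partition.append('1' + recursion(S[i + 1:j]) + '0')
--                 i = j + 1
--         return ''.join(sorted(partition, reverse=True))
--     return recursion(S), "1"
-- ===== SOURCE B (Python) =====
-- def makeLargestSpecial(S):
--     # One-pass stack machine: no recursion, no slicing.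
--     # frames[d] collects the finished parts at nesting depth d (frames[0] = top level);
--     # closes[d-1] is the running-total value at which frames[d] gets closed and wrapped.
--     frames = [[]]
--     closes = []
--     total = 0
--     for ch in S:
--         before = total
--         total += 1 if ch == '1' else -1
--         if closes and total == closes[-1]:
--             closes.pop()
--             parts = frames.pop()
--             frames[-1].append('1' + ''.join(sorted(parts, reverse=True)) + '0')
--         else:
--             closes.append(before)
--             frames.append([])
--     return ''.join(sorted(frames[0], reverse=True)), "1"
-- ===== Notes on version B (the rewrite author's own statement) =====
-- stated objective: alternative
-- what changed: A's recursive descent with repeated string slicing and an index/counter loop per level is replaced by a single left-to-right pass that keeps an explicit stack of per-depth part lists plus the running-total values at which each open frame closes; parts are wrapped, sorted and joined when a frame closes, so no recursion and no slicing remain.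
import Mathlib
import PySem

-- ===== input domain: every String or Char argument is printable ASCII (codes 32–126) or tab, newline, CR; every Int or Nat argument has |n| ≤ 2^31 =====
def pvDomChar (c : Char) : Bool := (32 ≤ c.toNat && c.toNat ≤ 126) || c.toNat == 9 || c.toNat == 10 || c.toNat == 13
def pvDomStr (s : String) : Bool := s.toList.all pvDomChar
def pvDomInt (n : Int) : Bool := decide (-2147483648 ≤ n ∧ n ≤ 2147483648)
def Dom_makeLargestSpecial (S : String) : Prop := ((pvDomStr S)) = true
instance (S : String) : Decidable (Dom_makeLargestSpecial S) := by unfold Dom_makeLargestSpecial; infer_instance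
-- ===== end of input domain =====

-- B replaces A's recursive slicing with a one-pass explicit-stack machine (no recursion, no
-- slicing; same cost overall); equivalence of the RETURN values is proved for all inputs.

-- ''.join(sorted(parts, reverse=True)) — the same library-call combination both Pythons use.
def pvSortJoin (parts : List (List Char)) : List Char :=
  PySem.Chars.join [] (PySem.List.sorted parts (fun l => String.ofList l) true)

-- ===== PORT A =====
-- recursion(S), with fuel (strictly larger than the string length; inner calls are on
-- strictly shorter strings, so the fuel never runs out on the initial call below).
def makeLargestSpecialRec : Nat → List Char → List Char
  | 0, _ => []
  | f + 1, s =>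
    let r := (PySem.List.pyRange 0 (s.length : Int) 1).foldl
      (fun (st : Int × Int × List (List Char)) (j : Int) =>
        let count := if PySem.List.pyGetD s j ' ' = '1' then st.1 + 1 else st.1 - 1
        if count = 0 then
          (count, j + 1,
            st.2.2 ++ [('1' :: makeLargestSpecialRec f (PySem.List.slice s (some (st.2.1 + 1)) (some j))) ++ ['0']])
        else (count, st.2.1, st.2.2))
      (0, 0, [])
    pvSortJoin r.2.2

def makeLargestSpecial (S : String) : String × String :=
  (String.ofList (makeLargestSpecialRec (S.toList.length + 1) S.toList), "1")

-- ===== PORT B =====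
-- one pass; state = (total, frames, closes); stack tops at the HEAD (Python appends/pops at the end).
def makeLargestSpecial_alt (S : String) : String × String :=
  let fin := S.toList.foldl
    (fun (st : Int × List (List (List Char)) × List Int) (ch : Char) =>
      let before := st.1
      let total := if ch = '1' then st.1 + 1 else st.1 - 1
      match st.2.2, st.2.1 with
      | cl :: crest, parts :: frest =>
        if total = cl then
          match frest with
          | top :: rest => (total, (top ++ [('1' :: pvSortJoin parts) ++ ['0']]) :: rest, crest)
          | [] => (total, [('1' :: pvSortJoin parts) ++ ['0']] :: ([] : List (List (List Char))), crest)
        else (total, ([] : List (List Char)) :: st.2.1, before :: st.2.2)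
      | _, _ => (total, ([] : List (List Char)) :: st.2.1, before :: st.2.2))
    (0, [[]], [])
  (String.ofList (pvSortJoin (fin.2.1.getLastD [])), "1")

-- ===== PRECONDITION & SPEC =====
def Spec_makeLargestSpecial (S : String) (out : String × String) : Prop := out = makeLargestSpecial_alt S
instance (S : String) (out : String × String) : Decidable (Spec_makeLargestSpecial S out) := by unfold Spec_makeLargestSpecial; infer_instance

-- ===== CLAIM (what is proved, stated in full; the proofs are below) =====
def Claim_equal_makeLargestSpecial : Prop := ∀ (S : String), Dom_makeLargestSpecial S → Spec_makeLargestSpecial S (makeLargestSpecial S)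

-- ===== LEMMAS AND PROOFS =====

-- named copies of the two fold bodies (definitionally equal to the lambdas in the ports)
def recStep (f : Nat) (s : List Char) (st : Int × Int × List (List Char)) (j : Int) :
    Int × Int × List (List Char) :=
  let count := if PySem.List.pyGetD s j ' ' = '1' then st.1 + 1 else st.1 - 1
  if count = 0 then
    (count, j + 1,
      st.2.2 ++ [('1' :: makeLargestSpecialRec f (PySem.List.slice s (some (st.2.1 + 1)) (some j))) ++ ['0']])
  else (count, st.2.1, st.2.2)

def altStep (st : Int × List (List (List Char)) × List Int) (ch : Char) :
    Int × List (List (List Char)) × List Int :=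
  let before := st.1
  let total := if ch = '1' then st.1 + 1 else st.1 - 1
  match st.2.2, st.2.1 with
  | cl :: crest, parts :: frest =>
    if total = cl then
      match frest with
      | top :: rest => (total, (top ++ [('1' :: pvSortJoin parts) ++ ['0']]) :: rest, crest)
      | [] => (total, [('1' :: pvSortJoin parts) ++ ['0']] :: ([] : List (List (List Char))), crest)
    else (total, ([] : List (List Char)) :: st.2.1, before :: st.2.2)
  | _, _ => (total, ([] : List (List Char)) :: st.2.1, before :: st.2.2)

lemma rec_eq (f : Nat) (s : List Char) :
    makeLargestSpecialRec (f + 1) s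
      = pvSortJoin (((PySem.List.pyRange 0 (s.length : Int) 1).foldl (recStep f s) (0, 0, [])).2.2) := rfl

lemma alt_eq (S : String) :
    makeLargestSpecial_alt S
      = (String.ofList (pvSortJoin ((S.toList.foldl altStep (0, [[]], [])).2.1.getLastD [])), "1") := rfl

-- ±1 value of a character, running total, first zero crossing
def pvSgn (c : Char) : Int := if c = '1' then 1 else -1
def pvNet (s : List Char) : Int := (s.map pvSgn).sum

def pvFC : List Char → Int → Option Nat
  | [], _ => none
  | c :: t, cnt => if cnt + pvSgn c = 0 then some 0 else (pvFC t (cnt + pvSgn c)).map (· + 1)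

lemma pvSgn_ne_zero (c : Char) : pvSgn c ≠ 0 := by
  unfold pvSgn; split <;> omega

lemma pvSgn_cases (c : Char) : pvSgn c = 1 ∨ pvSgn c = -1 := by
  unfold pvSgn; split <;> simp

lemma pvNet_nil : pvNet [] = 0 := rfl

lemma pvNet_cons (c : Char) (t : List Char) : pvNet (c :: t) = pvSgn c + pvNet t := by
  simp [pvNet]

lemma pvNet_append (a b : List Char) : pvNet (a ++ b) = pvNet a + pvNet b := by
  simp [pvNet]

lemma pvFC_lt_length {s : List Char} {c : Int} {k : Nat} (h : pvFC s c = some k) : k < s.length := by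
  induction s generalizing c k with
  | nil => simp [pvFC] at h
  | cons x t ih =>
    rw [pvFC] at h
    split at h
    · simp at h; subst h; simp
    · simp only [Option.map_eq_some_iff] at h
      obtain ⟨k', hk', rfl⟩ := h
      have := ih hk'
      simp; omega

lemma pvFC_zero_pos {s : List Char} {k : Nat} (h : pvFC s 0 = some k) : 1 ≤ k := by
  cases s with
  | nil => simp [pvFC] at h
  | cons x t =>
    rw [pvFC] at h
    split at h
    · exact absurd (by omega) (pvSgn_ne_zero x)
    · simp only [Option.map_eq_some_iff] at h
      obtain ⟨k', _, rfl⟩ := h; omega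

lemma pvFC_net {s : List Char} {c : Int} {k : Nat} (h : pvFC s c = some k) :
    c + pvNet (s.take (k + 1)) = 0 := by
  induction s generalizing c k with
  | nil => simp [pvFC] at h
  | cons x t ih =>
    rw [pvFC] at h
    split at h
    · rename_i hz
      simp at h
      subst h
      simp [pvNet]
      omega
    · simp only [Option.map_eq_some_iff] at h
      obtain ⟨k', hk', rfl⟩ := h
      have := ih hk'
      simp [pvNet_cons]
      omega

lemma pvFC_min {s : List Char} {c : Int} {k : Nat} (h : pvFC s c = some k) :
    ∀ m, 1 ≤ m → m ≤ k → c + pvNet (s.take m) ≠ 0 := by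
  induction s generalizing c k with
  | nil => simp [pvFC] at h
  | cons x t ih =>
    rw [pvFC] at h
    split at h
    · simp at h; subst h; intro m h1 h2; omega
    · rename_i hne
      simp only [Option.map_eq_some_iff] at h
      obtain ⟨k', hk', rfl⟩ := h
      intro m h1 h2
      cases m with
      | zero => omega
      | succ m' =>
        cases m' with
        | zero => simpa [pvNet] using hne
        | succ m'' =>
          have := ih hk' (m'' + 1) (by omega) (by omega)
          simp [pvNet_cons]
          intro hcon
          exact this (by omega)

lemma pvFC_none {s : List Char} {c : Int} (h : pvFC s c = none) :
    ∀ m, 1 ≤ m → m ≤ s.length → c + pvNet (s.take m) ≠ 0 := by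
  induction s generalizing c with
  | nil => intro m h1 h2; simp at h2; omega
  | cons x t ih =>
    rw [pvFC] at h
    split at h
    · simp at h
    · rename_i hne
      simp only [Option.map_eq_none_iff] at h
      intro m h1 h2
      cases m with
      | zero => omega
      | succ m' =>
        cases m' with
        | zero => simpa [pvNet] using hne
        | succ m'' =>
          have := ih h (m'' + 1) (by omega) (by simp at h2 ⊢; omega)
          simp [pvNet_cons]
          intro hcon
          exact this (by omega)

-- just before the first crossing the running total is ±1, with the sign of the start value
lemma pvFC_last {s : List Char} {c : Int} {k : Nat} (h : pvFC s c = some k) (hc : c ≠ 0) :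
    c + pvNet (s.take k) = if 0 < c then 1 else -1 := by
  induction s generalizing c k with
  | nil => simp [pvFC] at h
  | cons x t ih =>
    rw [pvFC] at h
    split at h
    · rename_i hz
      simp at h
      subst h
      rcases pvSgn_cases x with hx | hx <;> rw [hx] at hz <;> simp [pvNet] <;> split <;> omega
    · rename_i hne
      simp only [Option.map_eq_some_iff] at h
      obtain ⟨k', hk', rfl⟩ := h
      have hih := ih hk' hne
      rw [List.take_succ_cons, pvNet_cons]
      by_cases hpos : 0 < c
      · have hpos' : 0 < c + pvSgn x := by
          rcases pvSgn_cases x with hx | hx <;> omega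
        rw [if_pos hpos]
        rw [if_pos hpos'] at hih
        omega
      · have hpos' : ¬ 0 < c + pvSgn x := by
          rcases pvSgn_cases x with hx | hx <;> omega
        rw [if_neg hpos]
        rw [if_neg hpos'] at hih
        omega

-- the inner part of the first segment has running total 0 (sign/intermediate-value argument)
lemma pvSeg_inner_net {s : List Char} {k : Nat} (h : pvFC s 0 = some k) :
    pvNet ((s.drop 1).take (k - 1)) = 0 := by
  cases s with
  | nil => simp [pvFC] at h
  | cons x t =>
    rw [pvFC] at h
    split at h
    · exact absurd (by omega) (pvSgn_ne_zero x)
    · rename_i hne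
      simp only [Option.map_eq_some_iff] at h
      obtain ⟨k', hk', rfl⟩ := h
      have := pvFC_last hk' (by simpa using hne)
      simp only [List.drop_succ_cons, List.drop_zero, Nat.add_sub_cancel]
      rcases pvSgn_cases x with hx | hx <;> rw [hx] at this <;> simp at this <;> omega

-- canonical value: parts of the first-crossing decomposition, and their sorted join
mutual
def pvSpec (s : List Char) : List Char := pvSortJoin (pvParts s)
  termination_by (s.length, 1)
  decreasing_by
    exact Prod.Lex.right _ (by omega)

def pvParts (s : List Char) : List (List Char) :=
  match h : pvFC s 0 with
  | none => []
  | some k => (('1' :: pvSpec ((s.drop 1).take (k - 1))) ++ ['0']) :: pvParts (s.drop (k + 1))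
  termination_by (s.length, 0)
  decreasing_by
    · apply Prod.Lex.left
      have := pvFC_lt_length h
      simp; omega
    · apply Prod.Lex.left
      have := pvFC_lt_length h
      simp; omega
end

-- the same decomposition with an arbitrary wrapping function (used to close the recursion of port A)
def pvPartsG (g : List Char → List Char) (s : List Char) : List (List Char) :=
  match h : pvFC s 0 with
  | none => []
  | some k => (('1' :: g ((s.drop 1).take (k - 1))) ++ ['0']) :: pvPartsG g (s.drop (k + 1))
  termination_by s.length
  decreasing_by
    have := pvFC_lt_length h
    simp; omega

lemma pvParts_none {s : List Char} (h : pvFC s 0 = none) : pvParts s = [] := by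
  rw [pvParts]
  split
  · rfl
  · rename_i k hk; rw [h] at hk; cases hk

lemma pvParts_some {s : List Char} {k : Nat} (h : pvFC s 0 = some k) :
    pvParts s = (('1' :: pvSpec ((s.drop 1).take (k - 1))) ++ ['0']) :: pvParts (s.drop (k + 1)) := by
  rw [pvParts]
  split
  · rename_i hk; rw [h] at hk; cases hk
  · rename_i k' hk; rw [h] at hk; injection hk with hk; subst hk; rfl

lemma pvPartsG_none {s : List Char} (g : List Char → List Char) (h : pvFC s 0 = none) :
    pvPartsG g s = [] := by
  rw [pvPartsG]
  split
  · rfl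
  · rename_i k hk; rw [h] at hk; cases hk

lemma pvPartsG_some {s : List Char} {k : Nat} (g : List Char → List Char) (h : pvFC s 0 = some k) :
    pvPartsG g s = (('1' :: g ((s.drop 1).take (k - 1))) ++ ['0']) :: pvPartsG g (s.drop (k + 1)) := by
  rw [pvPartsG]
  split
  · rename_i hk; rw [h] at hk; cases hk
  · rename_i k' hk; rw [h] at hk; injection hk with hk; subst hk; rfl

lemma pvPartsG_congr (n : Nat) (g₁ g₂ : List Char → List Char)
    (hg : ∀ v : List Char, v.length < n → g₁ v = g₂ v) :
    ∀ s : List Char, s.length ≤ n → pvPartsG g₁ s = pvPartsG g₂ s := by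
  intro s
  induction hs : s.length using Nat.strong_induction_on generalizing s with
  | _ m ih =>
    subst hs
    intro hle
    cases hfc : pvFC s 0 with
    | none => rw [pvPartsG_none g₁ hfc, pvPartsG_none g₂ hfc]
    | some k =>
      have hk := pvFC_lt_length hfc
      rw [pvPartsG_some g₁ hfc, pvPartsG_some g₂ hfc]
      rw [hg _ (by simp; omega)]
      rw [ih (s.drop (k + 1)).length (by simp; omega) _ rfl (by simp; omega)]

lemma pvPartsG_spec : ∀ s : List Char, pvPartsG pvSpec s = pvParts s := by
  intro s
  induction hs : s.length using Nat.strong_induction_on generalizing s with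
  | _ m ih =>
    subst hs
    cases hfc : pvFC s 0 with
    | none => rw [pvPartsG_none _ hfc, pvParts_none hfc]
    | some k =>
      have hk := pvFC_lt_length hfc
      rw [pvPartsG_some _ hfc, pvParts_some hfc]
      rw [ih (s.drop (k + 1)).length (by simp; omega) _ rfl]

lemma pvSpec_eq (s : List Char) : pvSpec s = pvSortJoin (pvParts s) := by
  rw [pvSpec]

-- ===== the B side: the stack machine computes pvParts =====

lemma altStep_val (ch : Char) (t0 : Int) :
    (if ch = '1' then t0 + 1 else t0 - 1) = t0 + pvSgn ch := by
  unfold pvSgn; split <;> ring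

lemma altStep_push (t0 : Int) (Fs : List (List (List Char))) (C : List Int) (ch : Char)
    (h : ∀ cl C', C = cl :: C' → t0 + pvSgn ch ≠ cl) :
    altStep (t0, Fs, C) ch = (t0 + pvSgn ch, ([] : List (List Char)) :: Fs, t0 :: C) := by
  rcases C with _ | ⟨cl, crest⟩
  · rcases Fs with _ | ⟨p, fr⟩ <;> simp [altStep, altStep_val]
  · rcases Fs with _ | ⟨p, fr⟩
    · simp [altStep, altStep_val]
    · simp [altStep, altStep_val, h cl crest rfl]

lemma altStep_pop (t0 : Int) (parts : List (List Char)) (top : List (List Char))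
    (rest : List (List (List Char))) (cl : Int) (crest : List Int) (ch : Char)
    (h : t0 + pvSgn ch = cl) :
    altStep (t0, parts :: top :: rest, cl :: crest) ch
      = (t0 + pvSgn ch, (top ++ [('1' :: pvSortJoin parts) ++ ['0']]) :: rest, crest) := by
  simp [altStep, altStep_val, h]

lemma altRun : ∀ (n : Nat) (s : List Char), s.length ≤ n →
    ∀ (t0 : Int) (X : List (List Char)) (F : List (List (List Char))) (C : List Int),
    (∀ cl C', C = cl :: C' → ∀ m, 1 ≤ m → m ≤ s.length → t0 + pvNet (s.take m) ≠ cl) →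
    ∃ F' C', s.foldl altStep (t0, X :: F, C) = (t0 + pvNet s, F' ++ (X ++ pvParts s) :: F, C' ++ C)
      ∧ (pvNet s = 0 → F' = [] ∧ C' = []) := by
  intro n
  induction n with
  | zero =>
    intro s hlen t0 X F C _
    have hs : s = [] := List.eq_nil_of_length_eq_zero (by omega)
    subst hs
    exact ⟨[], [], by simp [pvParts_none (show pvFC [] 0 = none from rfl), pvNet_nil],
      fun _ => ⟨rfl, rfl⟩⟩
  | succ n ih =>
    intro s hlen t0 X F C hg
    cases s with
    | nil =>
      exact ⟨[], [], by simp [pvParts_none (show pvFC [] 0 = none from rfl), pvNet_nil],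
        fun _ => ⟨rfl, rfl⟩⟩
    | cons x t =>
      have hstep : altStep (t0, X :: F, C) x = (t0 + pvSgn x, [] :: X :: F, t0 :: C) := by
        apply altStep_push
        intro cl C' hC
        have := hg cl C' hC 1 (by omega) (by simp)
        simpa [pvNet] using this
      cases hfc : pvFC (x :: t) 0 with
      | none =>
        have hfc1 := hfc
        rw [pvFC] at hfc1
        split at hfc1
        · cases hfc1
        · rename_i hne
          simp only [Option.map_eq_none_iff] at hfc1
          have hfc' : pvFC t (0 + pvSgn x) = none := hfc1
          -- process the tail
          have hg' : ∀ cl C', (t0 :: C : List Int) = cl :: C' → ∀ m, 1 ≤ m → m ≤ t.length →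
              t0 + pvSgn x + pvNet (t.take m) ≠ cl := by
            intro cl C' hC m h1 h2
            injection hC with h3 h4
            subst h3
            have := pvFC_none hfc' m h1 h2
            intro hcon
            apply this
            omega
          obtain ⟨F₁, C₁, hrun, _⟩ := ih t (by simpa using Nat.lt_succ_iff.mp (by simpa using hlen)) (t0 + pvSgn x) [] (X :: F) (t0 :: C) hg'
          refine ⟨F₁ ++ [[] ++ pvParts t], C₁ ++ [t0], ?_, ?_⟩
          · rw [List.foldl_cons, hstep, hrun]
            rw [pvParts_none hfc]
            simp [pvNet_cons, List.append_assoc]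
            ring
          · intro h0
            exfalso
            have := pvFC_none hfc (t.length + 1) (by omega) (by simp)
            apply this
            simpa using h0
      | some k =>
        have hk1 := pvFC_zero_pos hfc
        have hklt := pvFC_lt_length hfc
        have hfc1 := hfc
        rw [pvFC] at hfc1
        split at hfc1
        · rename_i hz; exact absurd (by omega) (pvSgn_ne_zero x)
        · rename_i hne
          simp only [Option.map_eq_some_iff] at hfc1
          obtain ⟨k', hk', hkk⟩ := hfc1
          have hk'lt : k' < t.length := pvFC_lt_length hk'
          -- t = inner ++ closer :: rest
          have hsurg : t = t.take k' ++ t[k'] :: t.drop (k' + 1) := by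
            conv_lhs => rw [← List.take_append_drop k' t]
            rw [List.drop_eq_getElem_cons hk'lt]
          have hinner : pvNet (t.take k') = 0 := by
            have := pvSeg_inner_net hfc
            simpa [← hkk] using this
          have hcl : pvSgn (t[k']) = - pvSgn x := by
            have hnetseg : (0 : Int) + pvNet ((x :: t).take (k + 1)) = 0 :=
              pvFC_net hfc
            rw [List.take_succ_cons] at hnetseg
            have htk : t.take k = t.take k' ++ [t[k']] := by
              rw [← hkk, List.take_succ, List.getElem?_eq_getElem hk'lt]
              rfl
            rw [pvNet_cons, htk, pvNet_append, hinner] at hnetseg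
            have : pvNet [t[k']] = pvSgn (t[k']) := by simp [pvNet]
            rw [this] at hnetseg
            omega
          -- inner run
          have hg_inner : ∀ cl C', (t0 :: C : List Int) = cl :: C' → ∀ m, 1 ≤ m →
              m ≤ (t.take k').length → t0 + pvSgn x + pvNet ((t.take k').take m) ≠ cl := by
            intro cl C' hC m h1 h2
            injection hC with h3 _
            subst h3
            have hmk : m ≤ k' := by simp at h2; omega
            have htt : (t.take k').take m = t.take m := by
              rw [List.take_take]; congr 1; omega
            have := pvFC_min hfc (m + 1) (by omega) (by omega)
            rw [List.take_succ_cons, pvNet_cons] at this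
            rw [htt]
            intro hcon
            apply this
            omega
          obtain ⟨F₂, C₂, hrun2, hnil2⟩ := ih (t.take k') (by simp at hlen ⊢; omega) (t0 + pvSgn x) []
            (X :: F) (t0 :: C) hg_inner
          obtain ⟨hF₂, hC₂⟩ := hnil2 hinner
          subst hF₂; subst hC₂
          -- rest run
          have hg_rest : ∀ cl C', C = cl :: C' → ∀ m, 1 ≤ m → m ≤ (t.drop (k' + 1)).length →
              t0 + pvNet ((t.drop (k' + 1)).take m) ≠ cl := by
            intro cl C' hC m h1 h2
            have hfull : (x :: t).take (k + 1 + m)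
                = (x :: (t.take k' ++ [t[k']])) ++ (t.drop (k' + 1)).take m := by
              have hsplit2 : (x :: t : List Char) = (x :: (t.take k' ++ [t[k']])) ++ t.drop (k' + 1) := by
                conv_lhs => rw [hsurg]
                simp
              have harith : k + 1 + m - (x :: (t.take k' ++ [t[k']])).length = m := by
                simp; omega
              rw [hsplit2, List.take_append, List.take_of_length_le (by simp; omega), harith]
            have := hg cl C' hC (k + 1 + m) (by omega) (by simp at h2 ⊢; omega)
            rw [hfull, pvNet_append] at this
            have hpre : pvNet (x :: (t.take k' ++ [t[k']])) = 0 := by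
              rw [pvNet_cons, pvNet_append, hinner]
              have : pvNet [t[k']] = pvSgn (t[k']) := by simp [pvNet]
              rw [this, hcl]; ring
            rw [hpre] at this
            simpa using this
          obtain ⟨F₃, C₃, hrun3, hnil3⟩ := ih (t.drop (k' + 1)) (by simp at hlen ⊢; omega) t0
            (X ++ [('1' :: pvSpec (t.take k')) ++ ['0']]) F C hg_rest
          -- assemble
          refine ⟨F₃, C₃, ?_, ?_⟩
          · rw [List.foldl_cons, hstep]
            conv_lhs => rw [hsurg]
            rw [List.foldl_append, hrun2, List.foldl_cons]
            simp only [List.nil_append]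
            rw [hinner]
            have hpop2 : altStep (t0 + pvSgn x + 0, pvParts (t.take k') :: X :: F, t0 :: C) (t[k'])
                = (t0 + pvSgn x + 0 + pvSgn (t[k']),
                   (X ++ [('1' :: pvSortJoin (pvParts (t.take k'))) ++ ['0']]) :: F, C) := by
              apply altStep_pop
              rw [hcl]; ring
            rw [hpop2, hcl]
            have ht0 : t0 + pvSgn x + 0 + -pvSgn x = t0 := by ring
            rw [ht0, ← pvSpec_eq, hrun3]
            rw [pvParts_some hfc]
            have hinner_eq : ((x :: t).drop 1).take (k - 1) = t.take k' := by
              simp [← hkk]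
            have hdrop_eq : (x :: t).drop (k + 1) = t.drop (k' + 1) := by
              simp [← hkk]
            rw [hinner_eq, hdrop_eq, pvSpec_eq]
            have hnet : pvNet (x :: t) = pvNet (t.drop (k' + 1)) := by
              conv_lhs => rw [hsurg]
              simp only [pvNet_cons, pvNet_append]
              rw [hinner, hcl]
              ring
            rw [hnet]
            simp [List.append_assoc]
          · intro h0
            apply hnil3
            have hnet : pvNet (x :: t) = pvNet (t.drop (k' + 1)) := by
              conv_lhs => rw [hsurg]
              simp only [pvNet_cons, pvNet_append]
              rw [hinner, hcl]
              ring
            rw [← hnet]; exact h0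

-- ===== the A side: the indexed loop computes pvPartsG (makeLargestSpecialRec f) =====

lemma recStep_val (s : List Char) (j : Int) (count : Int) :
    (if PySem.List.pyGetD s j ' ' = '1' then count + 1 else count - 1)
      = count + pvSgn (PySem.List.pyGetD s j ' ') := by
  unfold pvSgn; split <;> ring

lemma recStep_eq (f : Nat) (s : List Char) (st : Int × Int × List (List Char)) (j : Int) :
    recStep f s st j =
      if st.1 + pvSgn (PySem.List.pyGetD s j ' ') = 0 then
        (st.1 + pvSgn (PySem.List.pyGetD s j ' '), j + 1,
          st.2.2 ++ [('1' :: makeLargestSpecialRec f (PySem.List.slice s (some (st.2.1 + 1)) (some j))) ++ ['0']])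
      else (st.1 + pvSgn (PySem.List.pyGetD s j ' '), st.2.1, st.2.2) := by
  unfold recStep
  rw [recStep_val]

lemma pv_getD (s : List Char) (j0 : Nat) (x : Char) (u : List Char) (hd : s.drop j0 = x :: u) :
    PySem.List.pyGetD s ((j0 : Nat) : Int) ' ' = x := by
  rw [PySem.List.pyGetD_natCast]
  have h0 : s[j0]? = some x := by
    have h1 : (s.drop j0)[0]? = some x := by rw [hd]; rfl
    rw [List.getElem?_drop] at h1
    simpa using h1
  simp [List.getD_eq_getElem?_getD, h0]

lemma recMid : ∀ (u : List Char) (s : List Char) (f : Nat) (j0 : Nat) (c i : Int)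
    (P : List (List Char)) (k : Nat), s.drop j0 = u → pvFC u c = some k →
    (PySem.List.pyRange (j0 : Int) ((j0 + k + 1 : Nat) : Int) 1).foldl (recStep f s) (c, i, P)
      = (0, ((j0 + k + 1 : Nat) : Int),
          P ++ [('1' :: makeLargestSpecialRec f (PySem.List.slice s (some (i + 1)) (some ((j0 + k : Nat) : Int)))) ++ ['0']]) := by
  intro u
  induction u with
  | nil => intro s f j0 c i P k hd hfc; simp [pvFC] at hfc
  | cons x u' ih =>
    intro s f j0 c i P k hd hfc
    have hx := pv_getD s j0 x u' hd
    have hd' : s.drop (j0 + 1) = u' := by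
      have := congrArg List.tail hd
      simpa [List.tail_drop] using this
    rw [pvFC] at hfc
    rw [PySem.List.pyRange_one_cons (by push_cast; omega), List.foldl_cons, recStep_eq]
    simp only [hx]
    split at hfc
    · rename_i hz
      simp at hfc
      subst hfc
      rw [if_pos hz]
      rw [show ((j0 + 0 + 1 : Nat) : Int) = (j0 : Int) + 1 by push_cast; ring]
      rw [PySem.List.pyRange_one_eq_nil (by omega), List.foldl_nil]
      rw [hz]
      norm_num
    · rename_i hne
      simp only [Option.map_eq_some_iff] at hfc
      obtain ⟨k', hk', hkk⟩ := hfc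
      rw [if_neg hne]
      have := ih s f (j0 + 1) (c + pvSgn x) i P k' hd' hk'
      rw [show ((j0 : Int) + 1) = (((j0 + 1 : Nat)) : Int) by push_cast; ring]
      rw [show ((j0 + k + 1 : Nat) : Int) = (((j0 + 1) + k' + 1 : Nat) : Int) by push_cast; omega]
      rw [this]
      rw [show ((j0 + 1) + k' + 1 : Nat) = j0 + k + 1 by omega,
          show ((j0 + 1) + k' : Nat) = j0 + k by omega]

lemma recNone : ∀ (u : List Char) (s : List Char) (f : Nat) (j0 : Nat) (c i : Int)
    (P : List (List Char)), s.drop j0 = u → pvFC u c = none →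
    (PySem.List.pyRange ((j0 : Nat) : Int) (s.length : Int) 1).foldl (recStep f s) (c, i, P)
      = (c + pvNet u, i, P) := by
  intro u
  induction u with
  | nil =>
    intro s f j0 c i P hd _
    have hlen : s.length ≤ j0 := by
      have := congrArg List.length hd
      simp at this
      omega
    rw [PySem.List.pyRange_one_eq_nil (by exact_mod_cast hlen), List.foldl_nil, pvNet_nil]
    norm_num
  | cons x u' ih =>
    intro s f j0 c i P hd hfc
    have hj0 : j0 < s.length := by
      have := congrArg List.length hd
      simp at this
      omega
    have hx := pv_getD s j0 x u' hd
    have hd' : s.drop (j0 + 1) = u' := by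
      have := congrArg List.tail hd
      simpa [List.tail_drop] using this
    rw [pvFC] at hfc
    split at hfc
    · cases hfc
    · rename_i hne
      simp only [Option.map_eq_none_iff] at hfc
      rw [PySem.List.pyRange_one_cons (by exact_mod_cast hj0), List.foldl_cons, recStep_eq]
      simp only [hx]
      rw [if_neg hne]
      rw [show ((j0 : Int) + 1) = (((j0 + 1 : Nat)) : Int) by push_cast; ring]
      rw [ih s f (j0 + 1) (c + pvSgn x) i P hd' hfc]
      rw [pvNet_cons]
      congr 1
      ring

lemma recRun : ∀ (n : Nat) (u : List Char), u.length ≤ n → ∀ (s : List Char) (f : Nat) (j0 : Nat)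
    (P : List (List Char)), s.drop j0 = u →
    ((PySem.List.pyRange ((j0 : Nat) : Int) (s.length : Int) 1).foldl (recStep f s) (0, ((j0 : Nat) : Int), P)).2.2
      = P ++ pvPartsG (makeLargestSpecialRec f) u := by
  intro n
  induction n with
  | zero =>
    intro u hlen s f j0 P hd
    have hu : u = [] := List.eq_nil_of_length_eq_zero (by omega)
    subst hu
    rw [recNone [] s f j0 0 (j0 : Int) P hd rfl, pvPartsG_none _ rfl]
    simp
  | succ n ih =>
    intro u hlen s f j0 P hd
    cases hfc : pvFC u 0 with
    | none =>
      rw [recNone u s f j0 0 (j0 : Int) P hd hfc, pvPartsG_none _ hfc]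
      simp
    | some k =>
      have hk1 := pvFC_zero_pos hfc
      have hklt := pvFC_lt_length hfc
      have hjlen : j0 + k + 1 ≤ s.length := by
        have := congrArg List.length hd
        simp at this
        omega
      rw [PySem.List.pyRange_one_append ((j0 : Nat) : Int) ((j0 + k + 1 : Nat) : Int) (s.length : Int)
        (by push_cast; omega) (by push_cast; omega)]
      rw [List.foldl_append]
      rw [recMid u s f j0 0 (j0 : Int) P k hd hfc]
      have hd2 : s.drop (j0 + k + 1) = u.drop (k + 1) := by
        rw [← hd, List.drop_drop]
        congr 1
      have := ih (u.drop (k + 1)) (by simp; omega) s f (j0 + k + 1)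
        (P ++ [('1' :: makeLargestSpecialRec f (PySem.List.slice s (some ((j0 : Int) + 1)) (some ((j0 + k : Nat) : Int)))) ++ ['0']]) hd2
      rw [this]
      rw [pvPartsG_some _ hfc]
      have hslice : PySem.List.slice s (some ((j0 : Int) + 1)) (some ((j0 + k : Nat) : Int))
          = (u.drop 1).take (k - 1) := by
        rw [show ((j0 : Int) + 1) = (((j0 + 1 : Nat)) : Int) by push_cast; ring]
        rw [PySem.List.slice_natCast]
        rw [show j0 + k - (j0 + 1) = k - 1 by omega]
        congr 1
        all_goals rw [← hd, List.drop_drop]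
      rw [hslice]
      simp [List.append_assoc]

lemma recChar : ∀ (n : Nat) (s : List Char) (f : Nat), s.length ≤ n → s.length < f →
    makeLargestSpecialRec f s = pvSpec s := by
  intro n
  induction n with
  | zero =>
    intro s f h1 h2
    have hs : s = [] := List.eq_nil_of_length_eq_zero (by omega)
    subst hs
    obtain ⟨f', rfl⟩ : ∃ f', f = f' + 1 := ⟨f - 1, by omega⟩
    rw [rec_eq]
    have h0 := recRun 0 [] (by simp) [] f' 0 [] (by simp)
    simp only [Nat.cast_zero, List.length_nil] at h0 ⊢
    rw [h0, pvPartsG_none _ rfl, pvSpec_eq, pvParts_none rfl]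
    simp
  | succ n ih =>
    intro s f h1 h2
    obtain ⟨f', rfl⟩ : ∃ f', f = f' + 1 := ⟨f - 1, by omega⟩
    rw [rec_eq]
    have h0 := recRun (n + 1) s (by omega) s f' 0 [] (by simp)
    simp only [Nat.cast_zero] at h0
    rw [h0]
    rw [pvPartsG_congr s.length (makeLargestSpecialRec f') pvSpec
      (fun v hv => ih v f' (by omega) (by omega)) s le_rfl]
    rw [pvPartsG_spec, pvSpec_eq]
    simp

-- ===== VERDICT (by name: the statement is the Claim_ definition above) =====
theorem makeLargestSpecial_spec : Claim_equal_makeLargestSpecial := by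
  intro S _
  unfold Spec_makeLargestSpecial
  unfold makeLargestSpecial
  rw [alt_eq]
  have hA : makeLargestSpecialRec (S.toList.length + 1) S.toList = pvSpec S.toList :=
    recChar S.toList.length S.toList _ le_rfl (by omega)
  have hB := altRun S.toList.length S.toList le_rfl 0 [] [] [] (by intro cl C' h; cases h)
  obtain ⟨F', C', hrun, -⟩ := hB
  rw [hrun]
  simp only [List.getLastD_concat, List.nil_append]
  rw [hA, pvSpec_eq]
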